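-- pv_equiv track=rewrite | github.com/Mariia370/Python | homemork_4/task_4_6_b.py | my_cycle
-- ===== SOURCE A (Python) =====
-- from itertools import cycle
--
-- def my_cycle(my_list, num_of_iter):
--     curr_num_of_iter = 0
--     if num_of_iter > 0:
--         for elem in cycle(my_list):
--             if curr_num_of_iter // 3 == num_of_iter:
--                 break
--             else:
--                 curr_num_of_iter += 1
--                 yield elem
--
--     else:
--         StopIteration
-- ===== SOURCE B (Python) =====
-- def my_cycle(my_list, num_of_iter):
--     total = 3 * num_of_iter
--     if not my_list or total <= 0:
--         return
--     q, r = divmod(total, len(my_list))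
--     yield from my_list * q + my_list[:r]
-- ===== Notes on version B (the rewrite author's own statement) =====
-- stated objective: alternative
-- what changed: B builds the whole output in bulk - divmod splits 3*num_of_iter into q full copies of the list plus a prefix slice, concatenated by list replication (my_list * q + my_list[:r]) and yielded from - instead of A's element-by-element itertools.cycle loop with a break counter.
import Mathlib
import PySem

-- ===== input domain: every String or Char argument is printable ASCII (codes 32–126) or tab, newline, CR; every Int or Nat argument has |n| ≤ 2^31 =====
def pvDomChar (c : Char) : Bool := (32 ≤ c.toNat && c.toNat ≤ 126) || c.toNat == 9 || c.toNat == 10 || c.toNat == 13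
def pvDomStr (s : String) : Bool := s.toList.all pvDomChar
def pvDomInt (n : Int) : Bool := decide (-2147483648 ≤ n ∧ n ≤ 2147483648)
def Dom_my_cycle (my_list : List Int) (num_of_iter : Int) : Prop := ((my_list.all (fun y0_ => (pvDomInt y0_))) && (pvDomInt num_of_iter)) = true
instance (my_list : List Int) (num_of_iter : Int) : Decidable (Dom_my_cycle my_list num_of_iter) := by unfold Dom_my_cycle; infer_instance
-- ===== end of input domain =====

-- B builds the result in bulk (divmod into q full copies of the list plus a prefix slice,
-- concatenated) instead of A's element-by-element cycle loop with a break counter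
-- (objective: alternative).  Both are generators in Python; equivalence is about the
-- yielded sequence.

-- ===== PORT A =====
-- loop over cycle(my_list): fuel-bounded recursion; `rest` is the unconsumed part of the current
-- pass of the cycle (refilled from `orig` when exhausted; an empty `orig` means cycle() yields
-- nothing and the for-loop ends).  The fuel only makes the same computation total: with
-- fuel = (3*n).toNat + 1 it is never exhausted before the break fires.
def myCycleLoopA (orig : List Int) (n : Int) : List Int → Int → Nat → List Int
  | _, _, 0 => []
  | rest, curr, fuel+1 =>
    match (if rest.isEmpty then orig else rest) with
    | [] => []
    | h :: t =>
      if PySem.Int.floordiv curr 3 = n then []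
      else h :: myCycleLoopA orig n t (curr + 1) fuel

def my_cycle (my_list : List Int) (num_of_iter : Int) : List Int :=
  if num_of_iter > 0 then
    myCycleLoopA my_list num_of_iter my_list 0 ((3 * num_of_iter).toNat + 1)
  else []

-- ===== PORT B =====
-- q, r = divmod(total, len(my_list)); yield from my_list * q + my_list[:r]
def my_cycle_alt (my_list : List Int) (num_of_iter : Int) : List Int :=
  let total := 3 * num_of_iter
  if my_list.isEmpty ∨ total ≤ 0 then []
  else
    let q := PySem.Int.floordiv total (my_list.length : Int)
    let r := PySem.Int.mod total (my_list.length : Int)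
    (List.replicate q.toNat my_list).flatten ++ PySem.List.slice my_list none (some r)

-- ===== PRECONDITION & SPEC =====
def Spec_my_cycle (my_list : List Int) (num_of_iter : Int) (out : List Int) : Prop := out = my_cycle_alt my_list num_of_iter
instance (my_list : List Int) (num_of_iter : Int) (out : List Int) : Decidable (Spec_my_cycle my_list num_of_iter out) := by unfold Spec_my_cycle; infer_instance

-- ===== CLAIM (what is proved, stated in full; the proofs are below) =====
def Claim_equal_my_cycle : Prop := ∀ (my_list : List Int) (num_of_iter : Int), Dom_my_cycle my_list num_of_iter → Spec_my_cycle my_list num_of_iter (my_cycle my_list num_of_iter)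

-- ===== LEMMAS AND PROOFS =====

-- step of the modulus: (curr+1) % len in terms of curr % len
theorem pvModSucc (curr len : Int) (hlen : 0 < len) :
    (curr + 1) % len = if curr % len + 1 = len then 0 else curr % len + 1 := by
  have h0 : 0 ≤ curr % len := Int.emod_nonneg curr (by omega)
  have h1 : curr % len < len := Int.emod_lt_of_pos curr hlen
  have hdecomp := Int.emod_add_mul_ediv curr len
  have hstep : (curr + 1) % len = (curr % len + 1) % len := by
    conv_lhs => rw [← hdecomp]
    rw [show curr % len + len * (curr / len) + 1 = curr % len + 1 + len * (curr / len) by ring,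
      Int.add_mul_emod_self_left]
  rw [hstep]
  split_ifs with h
  · rw [h, Int.emod_self]
  · exact Int.emod_eq_of_lt (by omega) (by omega)

-- loop invariant for A: if the pending cycle state (refilled when empty) is orig.drop (curr % len),
-- the loop produces exactly the modular-indexed elements for curr, curr+1, …, 3n-1.
theorem pvLoopA_eq (orig : List Int) (n : Int) (horig : orig ≠ [])
    (fuel : Nat) :
    ∀ (rest : List Int) (curr : Int), 0 ≤ curr → curr ≤ 3 * n →
    (3 * n - curr).toNat + 1 ≤ fuel →
    (if rest.isEmpty then orig else rest) = orig.drop ((curr % (orig.length : Int)).toNat) →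
    myCycleLoopA orig n rest curr fuel =
      (PySem.List.pyRange curr (3 * n) 1).map
        (fun i => PySem.List.pyGetD orig (PySem.Int.mod i (orig.length : Int)) 0) := by
  induction fuel with
  | zero => intro rest curr _ _ hfuel _; omega
  | succ fuel ih =>
    intro rest curr h0 h3 hfuel hinv
    have hlenpos : 0 < (orig.length : Int) := by
      have : orig.length ≠ 0 := by simpa [List.length_eq_zero_iff] using horig
      omega
    have hm0 : 0 ≤ curr % (orig.length : Int) := Int.emod_nonneg curr (by omega)
    have hm1 : curr % (orig.length : Int) < (orig.length : Int) := Int.emod_lt_of_pos curr hlenpos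
    set k : Nat := (curr % (orig.length : Int)).toNat with hk
    have hklt : k < orig.length := by omega
    have hnext : (if rest.isEmpty then orig else rest) = orig.drop k := hinv
    have hne : orig.drop k ≠ [] := by
      simp [List.drop_eq_nil_iff]; omega
    obtain ⟨h, t, hht⟩ : ∃ h t, orig.drop k = h :: t := by
      cases hd : orig.drop k with
      | nil => exact absurd hd hne
      | cons a b => exact ⟨a, b, rfl⟩
    have hbreak : PySem.Int.floordiv curr 3 = n ↔ curr = 3 * n := by
      rw [PySem.Int.floordiv_eq_iff_of_pos (by omega)]; omega
    rw [myCycleLoopA]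
    rw [hnext, hht]
    dsimp only
    by_cases hcurr : curr = 3 * n
    · rw [if_pos (hbreak.mpr hcurr)]
      subst hcurr
      have h00 : (3 * n - 3 * n).toNat = 0 := by omega
      rw [PySem.List.pyRange_one, h00]
      simp only [List.range_zero, List.map_nil]
    · have hlt : curr < 3 * n := by omega
      rw [if_neg (fun hcon => hcurr (hbreak.mp hcon))]
      rw [PySem.List.pyRange_one_cons (by omega)]
      rw [List.map_cons]
      congr 1
      · have hgetk : orig[k]? = some h := by
          rw [← List.head?_drop, hht]; rfl
        have hmodk : PySem.Int.mod curr ((orig.length : Nat) : Int) = (k : Int) := by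
          rw [PySem.Int.mod_eq_emod_of_pos hlenpos]; omega
        rw [hmodk, PySem.List.pyGetD_natCast, List.getD_eq_getElem?_getD, hgetk]
        rfl
      · apply ih t (curr + 1) (by omega) (by omega) (by omega)
        have ht : t = orig.drop (k + 1) := by
          have := congrArg List.tail hht
          simpa [List.tail_drop] using this.symm
        rw [pvModSucc curr _ hlenpos]
        by_cases hwrap : curr % (orig.length : Int) + 1 = (orig.length : Int)
        · rw [if_pos hwrap]
          have hkl : k + 1 = orig.length := by omega
          have htnil : t = [] := by rw [ht, hkl]; simp
          simp [htnil]
        · rw [if_neg hwrap]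
          have hk1 : k + 1 < orig.length := by omega
          have htne : t ≠ [] := by
            rw [ht]; simp [List.drop_eq_nil_iff]; omega
          rw [if_neg (by simpa [List.isEmpty_iff] using htne)]
          rw [ht]
          congr 1
          omega

-- a partial block: the first r modular-indexed elements are the prefix of length r
theorem pvTakeRange (l : List Int) (r : Nat) (hr : r ≤ l.length) :
    (List.range r).map (fun k => l.getD (k % l.length) 0) = l.take r := by
  apply List.ext_getElem
  · simp [Nat.min_eq_left hr]
  · intro i hi1 hi2
    simp only [List.getElem_map, List.getElem_range, List.getElem_take]
    have hil : i < l.length := by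
      simp at hi1; omega
    rw [Nat.mod_eq_of_lt hil, List.getD_eq_getElem l 0 hil]

-- block decomposition: q*len + r modular-indexed elements = q full copies plus a prefix of length r
theorem pvBlocks (l : List Int) (q : Nat) :
    ∀ r, r ≤ l.length →
    (List.range (q * l.length + r)).map (fun k => l.getD (k % l.length) 0)
      = (List.replicate q l).flatten ++ l.take r := by
  induction q with
  | zero => intro r hr; simpa using pvTakeRange l r hr
  | succ q ih =>
    intro r hr
    have hsplit : (q + 1) * l.length + r = l.length + (q * l.length + r) := by ring
    rw [hsplit, List.range_add, List.map_append, List.map_map]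
    have h1 : (List.range l.length).map (fun k => l.getD (k % l.length) 0) = l := by
      rw [pvTakeRange l l.length le_rfl, List.take_length]
    have h2 : ((List.range (q * l.length + r)).map
        ((fun k => l.getD (k % l.length) 0) ∘ (l.length + ·)))
        = (List.replicate q l).flatten ++ l.take r := by
      rw [← ih r hr]
      apply List.map_congr_left
      intro k _
      simp [Nat.add_mod_left]
    rw [h1, h2, List.replicate_succ, List.flatten_cons, List.append_assoc]

-- ===== VERDICT (by name: the statement is the Claim_ definition above) =====
theorem my_cycle_spec : Claim_equal_my_cycle := by
  intro my_list num_of_iter _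
  unfold Spec_my_cycle my_cycle my_cycle_alt
  dsimp only
  by_cases hn : num_of_iter > 0
  · rw [if_pos hn]
    by_cases hnil : my_list = []
    · subst hnil
      simp [myCycleLoopA]
    · rw [if_neg (by simp [List.isEmpty_iff, hnil]; omega)]
      rw [pvLoopA_eq my_list num_of_iter hnil _ my_list 0 le_rfl (by omega) (by omega) (by simp)]
      -- switch to Nat: total = ↑T, len = ↑N
      set N : Nat := my_list.length with hN
      have hNpos : 0 < N := by
        have : my_list.length ≠ 0 := by simpa [List.length_eq_zero_iff] using hnil
        omega
      set T : Nat := (3 * num_of_iter).toNat with hT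
      have hTcast : (3 : Int) * num_of_iter = (T : Int) := by omega
      rw [hTcast, PySem.List.pyRange_zero_nat, List.map_map]
      have hmap : (List.range T).map
            ((fun i => PySem.List.pyGetD my_list (PySem.Int.mod i (↑N : Int)) 0) ∘ (fun k : Nat => (↑k : Int)))
          = (List.range T).map (fun k => my_list.getD (k % N) 0) := by
        apply List.map_congr_left
        intro k _
        simp only [Function.comp_apply]
        rw [PySem.Int.mod_natCast, PySem.List.pyGetD_natCast]
      rw [hmap]
      have hfd : PySem.Int.floordiv (↑T : Int) (↑N : Int) = ((T / N : Nat) : Int) :=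
        PySem.Int.floordiv_natCast T N
      have hmd : PySem.Int.mod (↑T : Int) (↑N : Int) = ((T % N : Nat) : Int) :=
        PySem.Int.mod_natCast T N
      rw [hfd, hmd, PySem.List.slice_to_natCast, Int.toNat_natCast]
      have hblocks := pvBlocks my_list (T / N) (T % N) (le_of_lt (Nat.mod_lt T hNpos))
      rw [← hN, Nat.div_add_mod' T N] at hblocks
      exact hblocks
  · rw [if_neg hn, if_pos (Or.inr (by omega))]
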